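-- pv_equiv track=rewrite | github.com/RaghavTiwari31/AquaMind---RAG-Pipeline | frontend/dash_app.py | detect_lat_lon_columns
-- ===== SOURCE A (Python) =====
-- def detect_lat_lon_columns(columns):
--     lat_col = None
--     lon_col = None
--     for c in columns:
--         lc = c.lower()
--         if lat_col is None and "lat" in lc:
--             lat_col = c
--         if lon_col is None and ("lon" in lc or "long" in lc):
--             lon_col = c
--     return lat_col, lon_col
-- ===== SOURCE B (Python) =====
-- def detect_lat_lon_columns(columns):
--     cols = list(columns)
--     lat_col = next((c for c in cols if "lat" in c.lower()), None)
--     lon_col = next((c for c in cols if "lon" in c.lower() or "long" in c.lower()), None)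
--     return lat_col, lon_col
-- ===== Notes on version B (the rewrite author's own statement) =====
-- stated objective: idiomatic
-- what changed: Replaces the single interleaved loop carrying two mutable slots with two independent first-match selections (next over a generator) on a materialized list.
import Mathlib
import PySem

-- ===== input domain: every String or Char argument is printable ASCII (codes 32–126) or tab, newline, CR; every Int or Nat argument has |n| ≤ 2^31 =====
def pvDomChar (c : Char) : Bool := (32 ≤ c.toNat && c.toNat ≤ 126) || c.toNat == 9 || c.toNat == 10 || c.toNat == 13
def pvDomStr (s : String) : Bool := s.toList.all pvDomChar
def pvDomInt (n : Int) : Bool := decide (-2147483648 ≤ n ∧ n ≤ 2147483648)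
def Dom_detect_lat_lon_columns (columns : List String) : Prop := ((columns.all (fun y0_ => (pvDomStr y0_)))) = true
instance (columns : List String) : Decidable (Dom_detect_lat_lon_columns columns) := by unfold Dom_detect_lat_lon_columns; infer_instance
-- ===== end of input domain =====

-- ===== PORT A =====
-- literal transliteration of A: a fold over columns carrying (lat_col, lon_col)
def detect_lat_lon_columns (columns : List String) : Option String × Option String :=
  columns.foldl
    (fun st c =>
      let lc := PySem.Str.lower c
      let lat := if st.1 = none ∧ PySem.Str.isIn "lat" lc then some c else st.1
      let lon := if st.2 = none ∧ (PySem.Str.isIn "lon" lc ∨ PySem.Str.isIn "long" lc) then some c else st.2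
      (lat, lon))
    (none, none)

-- ===== PORT B =====
-- B: two independent first-match passes
def detect_lat_lon_columns_alt (columns : List String) : Option String × Option String :=
  (columns.find? (fun c => PySem.Str.isIn "lat" (PySem.Str.lower c)),
   columns.find? (fun c => PySem.Str.isIn "lon" (PySem.Str.lower c) || PySem.Str.isIn "long" (PySem.Str.lower c)))

-- ===== PRECONDITION & SPEC =====
def Spec_detect_lat_lon_columns (columns : List String) (out : Option String × Option String) : Prop := out = detect_lat_lon_columns_alt columns
instance (columns : List String) (out : Option String × Option String) : Decidable (Spec_detect_lat_lon_columns columns out) := by unfold Spec_detect_lat_lon_columns; infer_instance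

-- ===== CLAIM (what is proved, stated in full; the proofs are below) =====
def Claim_equal_detect_lat_lon_columns : Prop := ∀ (columns : List String), Dom_detect_lat_lon_columns columns → Spec_detect_lat_lon_columns columns (detect_lat_lon_columns columns)

-- ===== LEMMAS AND PROOFS =====

-- ===== VERDICT (by name: the statement is the Claim_ definition above) =====
-- the fold with "fill slot only when empty" equals the accumulator orElse the first match
theorem foldA_eq (columns : List String) (a b : Option String) :
    columns.foldl
      (fun st c =>
        let lc := PySem.Str.lower c
        let lat := if st.1 = none ∧ PySem.Str.isIn "lat" lc then some c else st.1
        let lon := if st.2 = none ∧ (PySem.Str.isIn "lon" lc ∨ PySem.Str.isIn "long" lc) then some c else st.2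
        (lat, lon))
      (a, b)
    = (a.orElse (fun _ => columns.find? (fun c => PySem.Str.isIn "lat" (PySem.Str.lower c))),
       b.orElse (fun _ => columns.find? (fun c => PySem.Str.isIn "lon" (PySem.Str.lower c) || PySem.Str.isIn "long" (PySem.Str.lower c)))) := by
  induction columns generalizing a b with
  | nil => cases a <;> cases b <;> simp [Option.orElse]
  | cons c cs ih =>
      simp only [List.foldl_cons, List.find?_cons]
      rw [ih]
      cases a <;> cases b <;>
        simp [Option.orElse] <;>
        split_ifs <;> (try simp_all) <;>
        (rename_i h; obtain h | h := h <;> simp_all)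

theorem detect_lat_lon_columns_spec : Claim_equal_detect_lat_lon_columns := by
  intro columns _
  unfold Spec_detect_lat_lon_columns detect_lat_lon_columns detect_lat_lon_columns_alt
  rw [foldA_eq]
  simp [Option.orElse]
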